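-- pv_equiv track=rewrite | github.com/logc/adventofcode | 2015/python/day03.py | record_both_positions
-- ===== SOURCE A (Python) =====
-- def update_position(current, update):
--     """
--     Returns an updated position for Santa.
--     """
--     new = current
--     if update == ">":
--         new = (current[0] + 1, current[1])
--     if update == "<":
--         new = (current[0] - 1, current[1])
--     if update == "^":
--         new = (current[0], current[1] + 1)
--     if update == "v":
--         new = (current[0], current[1] - 1)
--     return new
--
-- def record_both_positions(updates):
--     """
--     Moves Santa and Robo-Santa around the grid following the updates, and
--     records each position where they have been. Returns all positions.
--     """
--     santa = (0, 0)
--     robos = (0, 0)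
--     positions = [santa, robos]
--     for turn, update in enumerate(updates):
--         if turn % 2 == 0:
--             santa = update_position(santa, update)
--             positions.append(santa)
--         else:
--             robos = update_position(robos, update)
--             positions.append(robos)
--     return positions
-- ===== SOURCE B (Python) =====
-- DELTAS = {">": (1, 0), "<": (-1, 0), "^": (0, 1), "v": (0, -1)}
--
-- def _path(moves):
--     """Cumulative positions starting from (0, 0)."""
--     x = y = 0
--     out = []
--     for dx, dy in moves:
--         x += dx
--         y += dy
--         out.append((x, y))
--     return out
--
-- def record_both_positions(updates):
--     """
--     Same recorded positions, by splitting the updates into Santa's moves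
--     (even turns) and Robo-Santa's moves (odd turns), computing each path
--     as a running sum, and interleaving the two paths after the two starts.
--     """
--     moves = [DELTAS.get(c, (0, 0)) for c in updates]
--     santa = _path(moves[0::2])
--     robo = _path(moves[1::2])
--     result = [(0, 0), (0, 0)]
--     for s, r in zip(santa, robo):
--         result.append(s)
--         result.append(r)
--     if len(santa) > len(robo):
--         result.append(santa[-1])
--     return result
-- ===== Notes on version B (the rewrite author's own statement) =====
-- stated objective: alternative
-- what changed: Replaces the single enumerate loop with a parity branch and a chain of ifs by a delta-dict lookup, an even/odd split of the moves, two independent running-sum paths, and a zip interleave (plus the odd-length tail).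
import Mathlib
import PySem

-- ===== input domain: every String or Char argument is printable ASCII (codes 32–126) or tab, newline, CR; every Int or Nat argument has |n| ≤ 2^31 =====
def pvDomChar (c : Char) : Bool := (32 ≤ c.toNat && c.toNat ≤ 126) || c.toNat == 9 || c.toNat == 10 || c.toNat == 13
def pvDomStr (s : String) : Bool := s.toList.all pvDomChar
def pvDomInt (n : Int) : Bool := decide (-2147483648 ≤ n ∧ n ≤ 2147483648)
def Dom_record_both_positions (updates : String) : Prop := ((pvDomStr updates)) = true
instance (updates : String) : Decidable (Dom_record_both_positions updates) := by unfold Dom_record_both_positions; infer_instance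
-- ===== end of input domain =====

-- B replaces the enumerate loop with a parity branch and chained ifs by a delta-dict,
-- an even/odd split into two running-sum paths, and a zip interleave (objective: alternative).

-- ===== PORT A =====
def update_position (current : Int × Int) (update : String) : Int × Int :=
  let new := current
  let new := if update = ">" then (current.1 + 1, current.2) else new
  let new := if update = "<" then (current.1 - 1, current.2) else new
  let new := if update = "^" then (current.1, current.2 + 1) else new
  let new := if update = "v" then (current.1, current.2 - 1) else new
  new

-- the body of A's for-loop, as a helper (state = (santa, robos, positions))
def pvStepA (st : (Int × Int) × (Int × Int) × List (Int × Int)) (tu : Int × Char) :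
    (Int × Int) × (Int × Int) × List (Int × Int) :=
  if tu.1 % 2 == 0 then
    let santa := update_position st.1 (String.ofList [tu.2])
    (santa, st.2.1, st.2.2 ++ [santa])
  else
    let robos := update_position st.2.1 (String.ofList [tu.2])
    (st.1, robos, st.2.2 ++ [robos])

def record_both_positions (updates : String) : List (Int × Int) :=
  let santa : Int × Int := (0, 0)
  let robos : Int × Int := (0, 0)
  let positions : List (Int × Int) := [santa, robos]
  ((PySem.List.enumerate updates.toList).foldl pvStepA (santa, robos, positions)).2.2

-- ===== PORT B =====
def pvDELTAS : PySem.Dict Char (Int × Int) :=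
  PySem.Dict.ofList [('>', (1, 0)), ('<', (-1, 0)), ('^', (0, 1)), ('v', (0, -1))]

-- _path: running sum of moves from (0, 0)
def pvStepP (st : (Int × Int) × List (Int × Int)) (m : Int × Int) :
    (Int × Int) × List (Int × Int) :=
  ((st.1.1 + m.1, st.1.2 + m.2), st.2 ++ [(st.1.1 + m.1, st.1.2 + m.2)])

def pvPath (moves : List (Int × Int)) : List (Int × Int) :=
  (moves.foldl pvStepP ((0, 0), [])).2

-- hand ports of the step-2 slices moves[0::2] and moves[1::2] (exact; PySem has no step slices)
def pvEvens {α : Type} : List α → List α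
  | [] => []
  | [x] => [x]
  | x :: _ :: rest => x :: pvEvens rest

def pvOdds {α : Type} : List α → List α
  | [] => []
  | [_] => []
  | _ :: y :: rest => y :: pvOdds rest

-- the body of B's zip loop
def pvStepZ (acc : List (Int × Int)) (sr : (Int × Int) × (Int × Int)) : List (Int × Int) :=
  acc ++ [sr.1, sr.2]

def record_both_positions_alt (updates : String) : List (Int × Int) :=
  let moves := updates.toList.map (fun c => pvDELTAS.getD c (0, 0))
  let santa := pvPath (pvEvens moves)
  let robo := pvPath (pvOdds moves)
  let result := (santa.zip robo).foldl pvStepZ [(0, 0), (0, 0)]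
  if robo.length < santa.length then result ++ [PySem.List.pyGetD santa (-1) (0, 0)]
  else result

-- ===== PRECONDITION & SPEC =====
def Spec_record_both_positions (updates : String) (out : List (Int × Int)) : Prop := out = record_both_positions_alt updates
instance (updates : String) (out : List (Int × Int)) : Decidable (Spec_record_both_positions updates out) := by unfold Spec_record_both_positions; infer_instance

-- ===== CLAIM (what is proved, stated in full; the proofs are below) =====
def Claim_equal_record_both_positions : Prop := ∀ (updates : String), Dom_record_both_positions updates → Spec_record_both_positions updates (record_both_positions updates)

-- ===== LEMMAS AND PROOFS =====

-- two-at-a-time induction on lists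
def pv_two_step {α : Type} {P : List α → Prop} (h0 : P []) (h1 : ∀ a, P [a])
    (h2 : ∀ a b l, P l → P (a :: b :: l)) : ∀ l, P l
  | [] => h0
  | [a] => h1 a
  | a :: b :: l => h2 a b l (pv_two_step h0 h1 h2 l)

-- one movement step, as B computes it
def pvMove (p : Int × Int) (c : Char) : Int × Int :=
  (p.1 + (pvDELTAS.getD c (0, 0)).1, p.2 + (pvDELTAS.getD c (0, 0)).2)

-- the common shape of both programs' output after the two starting positions
def pvCore : List Char → Int × Int → Int × Int → List (Int × Int)
  | [], _, _ => []
  | [c], s, _ => [pvMove s c]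
  | c1 :: c2 :: rest, s, r =>
      pvMove s c1 :: pvMove r c2 :: pvCore rest (pvMove s c1) (pvMove r c2)

def pvPathF : Int × Int → List (Int × Int) → List (Int × Int)
  | _, [] => []
  | p, m :: ms => (p.1 + m.1, p.2 + m.2) :: pvPathF (p.1 + m.1, p.2 + m.2) ms

def pvInter : List (Int × Int) → List (Int × Int) → List (Int × Int)
  | s :: ss, r :: rs => s :: r :: pvInter ss rs
  | _, _ => []

theorem pv_single_eq (c d : Char) : (String.ofList [c] = String.ofList [d]) ↔ c = d := by
  constructor
  · intro h
    have h2 := congrArg String.toList h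
    simpa using h2
  · intro h; rw [h]

theorem pv_update_eq (p : Int × Int) (c : Char) :
    update_position p (String.ofList [c]) = pvMove p c := by
  by_cases h1 : c = '>'
  · subst h1
    have e : (String.ofList ['>'] : String) = ">" := by decide
    have d : pvDELTAS.getD '>' (0, 0) = ((1 : Int), (0 : Int)) := by decide
    simp [update_position, pvMove, e, d]
  by_cases h2 : c = '<'
  · subst h2
    have e : (String.ofList ['<'] : String) = "<" := by decide
    have d : pvDELTAS.getD '<' (0, 0) = ((-1 : Int), (0 : Int)) := by decide
    simp [update_position, pvMove, e, d]
    omega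
  by_cases h3 : c = '^'
  · subst h3
    have e : (String.ofList ['^'] : String) = "^" := by decide
    have d : pvDELTAS.getD '^' (0, 0) = ((0 : Int), (1 : Int)) := by decide
    simp [update_position, pvMove, e, d]
  by_cases h4 : c = 'v'
  · subst h4
    have e : (String.ofList ['v'] : String) = "v" := by decide
    have d : pvDELTAS.getD 'v' (0, 0) = ((0 : Int), (-1 : Int)) := by decide
    simp [update_position, pvMove, e, d]
    omega
  · -- unknown character: every branch misses and the dict lookup defaults to (0, 0)
    have n1 : ¬ (String.ofList [c] = ">") := by
      rw [show (">" : String) = String.ofList ['>'] from by decide, pv_single_eq]; exact h1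
    have n2 : ¬ (String.ofList [c] = "<") := by
      rw [show ("<" : String) = String.ofList ['<'] from by decide, pv_single_eq]; exact h2
    have n3 : ¬ (String.ofList [c] = "^") := by
      rw [show ("^" : String) = String.ofList ['^'] from by decide, pv_single_eq]; exact h3
    have n4 : ¬ (String.ofList [c] = "v") := by
      rw [show ("v" : String) = String.ofList ['v'] from by decide, pv_single_eq]; exact h4
    have dmk : pvDELTAS = PySem.Dict.mk [('>', (1, 0)), ('<', (-1, 0)), ('^', (0, 1)), ('v', (0, -1))] := by decide
    have dmiss : pvDELTAS.getD c (0, 0) = ((0 : Int), (0 : Int)) := by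
      rw [dmk, PySem.Dict.getD_eq_get?_getD]
      rw [PySem.Dict.get?_mk_cons, PySem.Dict.get?_mk_cons, PySem.Dict.get?_mk_cons,
          PySem.Dict.get?_mk_cons]
      simp [Ne.symm h1, Ne.symm h2, Ne.symm h3, Ne.symm h4, PySem.Dict.get?]
    simp [update_position, pvMove, n1, n2, n3, n4, dmiss]

theorem pv_foldA : ∀ (cs : List Char) (k : Int) (s r : Int × Int) (ps : List (Int × Int)),
    k % 2 = 0 →
    ((PySem.List.enumerate cs k).foldl pvStepA (s, r, ps)).2.2 = ps ++ pvCore cs s r := by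
  intro cs
  induction cs using pv_two_step with
  | h0 => intro k s r ps hk; simp [PySem.List.enumerate, pvCore]
  | h1 c =>
      intro k s r ps hk
      simp [PySem.List.enumerate, pvStepA, hk, pvCore, pv_update_eq]
  | h2 c1 c2 rest ih =>
      intro k s r ps hk
      have hk1 : (k + 1) % 2 = 1 := by omega
      have hk2 : (k + 2) % 2 = 0 := by omega
      rw [PySem.List.enumerate_cons, PySem.List.enumerate_cons]
      simp only [List.foldl_cons]
      rw [show pvStepA (s, r, ps) (k, c1)
            = (update_position s (String.ofList [c1]), r,
               ps ++ [update_position s (String.ofList [c1])]) from by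
            simp [pvStepA, hk]]
      rw [show ∀ s' ps', pvStepA (s', r, ps') (k + 1, c2)
            = (s', update_position r (String.ofList [c2]),
               ps' ++ [update_position r (String.ofList [c2])]) from by
            intro s' ps'; simp [pvStepA, hk1]]
      rw [ih (k + 1 + 1) _ _ _ (by omega)]
      simp [pvCore, pv_update_eq, List.append_assoc]

theorem pv_pathfold : ∀ (ms : List (Int × Int)) (p : Int × Int) (acc : List (Int × Int)),
    (ms.foldl pvStepP (p, acc)).2 = acc ++ pvPathF p ms := by
  intro ms
  induction ms with
  | nil => intro p acc; simp [pvPathF]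
  | cons m ms ih =>
      intro p acc
      simp only [List.foldl_cons]
      rw [show pvStepP (p, acc) m
            = ((p.1 + m.1, p.2 + m.2), acc ++ [(p.1 + m.1, p.2 + m.2)]) from rfl]
      rw [ih]
      simp [pvPathF, List.append_assoc]

theorem pv_path_eq (ms : List (Int × Int)) : pvPath ms = pvPathF (0, 0) ms := by
  simpa using pv_pathfold ms (0, 0) []

theorem pv_zipfold : ∀ (sa ro acc : List (Int × Int)),
    ((sa.zip ro).foldl pvStepZ acc) = acc ++ pvInter sa ro := by
  intro sa
  induction sa with
  | nil => intro ro acc; simp [pvInter]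
  | cons s ss ih =>
      intro ro acc
      cases ro with
      | nil => simp [pvInter]
      | cons r rs =>
          simp only [List.zip_cons_cons, List.foldl_cons]
          rw [show pvStepZ acc (s, r) = acc ++ [s, r] from rfl, ih]
          simp [pvInter, List.append_assoc]

theorem pv_pyGetD_cons (x : Int × Int) (xs : List (Int × Int)) (h : xs ≠ []) :
    PySem.List.pyGetD (x :: xs) (-1) (0, 0) = PySem.List.pyGetD xs (-1) (0, 0) := by
  rcases List.eq_nil_or_concat xs with h' | ⟨ys, y, h'⟩
  · exact absurd h' h
  · subst h'
    simp only [List.concat_eq_append]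
    rw [show x :: (ys ++ [y]) = (x :: ys) ++ [y] from rfl]
    rw [PySem.List.pyGetD_neg_one_append_singleton, PySem.List.pyGetD_neg_one_append_singleton]

theorem pv_pyGetD_single (m : Int × Int) : PySem.List.pyGetD [m] (-1) (0, 0) = m := by
  rw [show ([m] : List (Int × Int)) = [] ++ [m] from rfl]
  rw [PySem.List.pyGetD_neg_one_append_singleton]

theorem pv_coreB : ∀ (cs : List Char) (s r : Int × Int),
    pvInter (pvPathF s (pvEvens (cs.map (fun c => pvDELTAS.getD c (0, 0)))))
            (pvPathF r (pvOdds (cs.map (fun c => pvDELTAS.getD c (0, 0)))))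
      ++ (if (pvPathF r (pvOdds (cs.map (fun c => pvDELTAS.getD c (0, 0))))).length
            < (pvPathF s (pvEvens (cs.map (fun c => pvDELTAS.getD c (0, 0))))).length
          then [PySem.List.pyGetD
                  (pvPathF s (pvEvens (cs.map (fun c => pvDELTAS.getD c (0, 0))))) (-1) (0, 0)]
          else [])
    = pvCore cs s r := by
  intro cs
  induction cs using pv_two_step with
  | h0 => intro s r; simp [pvEvens, pvOdds, pvPathF, pvInter, pvCore]
  | h1 c =>
      intro s r
      simp only [List.map, pvEvens, pvOdds, pvPathF, pvInter, pvCore]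
      have h : ((0 : Nat) < 1) := by omega
      simp only [List.length_nil, List.length_cons, if_pos h, List.nil_append]
      rw [show ((s.1 + (pvDELTAS.getD c (0, 0)).1, s.2 + (pvDELTAS.getD c (0, 0)).2) : Int × Int)
            = pvMove s c from rfl]
      rw [pv_pyGetD_single]
  | h2 c1 c2 rest ih =>
      intro s r
      simp only [List.map, pvEvens, pvOdds, pvPathF, pvInter, pvCore]
      have ih' := ih (pvMove s c1) (pvMove r c2)
      set SA := pvPathF (pvMove s c1) (pvEvens (rest.map (fun c => pvDELTAS.getD c (0, 0)))) with hSA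
      set RO := pvPathF (pvMove r c2) (pvOdds (rest.map (fun c => pvDELTAS.getD c (0, 0)))) with hRO
      have hmv1 : ((s.1 + (pvDELTAS.getD c1 (0, 0)).1, s.2 + (pvDELTAS.getD c1 (0, 0)).2) : Int × Int) = pvMove s c1 := rfl
      have hmv2 : ((r.1 + (pvDELTAS.getD c2 (0, 0)).1, r.2 + (pvDELTAS.getD c2 (0, 0)).2) : Int × Int) = pvMove r c2 := rfl
      rw [hmv1, hmv2, ← hSA, ← hRO]
      by_cases h : RO.length < SA.length
      · have hne : SA ≠ [] := by
          intro hnil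
          rw [hnil] at h
          simp at h
        simp only [List.length_cons]
        rw [if_pos (show RO.length + 1 < SA.length + 1 by omega)]
        rw [pv_pyGetD_cons _ _ hne]
        rw [if_pos h] at ih'
        rw [← ih']
        simp
      · simp only [List.length_cons]
        rw [if_neg (show ¬ (RO.length + 1 < SA.length + 1) by omega)]
        rw [if_neg h] at ih'
        simp only [List.append_nil] at ih' ⊢
        rw [ih']

-- ===== VERDICT (by name: the statement is the Claim_ definition above) =====
theorem record_both_positions_spec : Claim_equal_record_both_positions := by
  intro u _
  unfold Spec_record_both_positions
  show record_both_positions u = record_both_positions_alt u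
  simp only [record_both_positions, record_both_positions_alt]
  rw [pv_foldA u.toList 0 (0, 0) (0, 0) [(0, 0), (0, 0)] (by decide)]
  rw [pv_path_eq, pv_path_eq, pv_zipfold]
  rw [← pv_coreB u.toList (0, 0) (0, 0)]
  split_ifs <;> simp
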